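-- pv_equiv track=rewrite | github.com/EliaStocco/QuantumSparse | examples/symmeties.py | orbit_states
-- ===== SOURCE A (Python) =====
-- def rotate_bits_left(x, L, s=1):
--     """Cyclic left shift by s on L-bit integer x (site 0 -> 1)."""
--     s %= L
--     if s == 0:
--         return x
--     upper = (x << s) & ((1 << L) - 1)
--     lower = x >> (L - s)
--     return upper | lower
--
-- def orbit_states(b, L):
--     """Return unique orbit of basis state b under translations T^r, r=0..L-1.
--     Also returns the minimal period R (stabilizer size divisor) s.t. T^R|b>=|b|.
--     """
--     seen = {}
--     states = []
--     cur = b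
--     for r in range(L):
--         if cur in seen:
--             break
--         seen[cur] = r
--         states.append(cur)
--         cur = rotate_bits_left(cur, L, 1)
--     R = len(states)
--     return states, R
-- ===== SOURCE B (Python) =====
-- def _rot(x, L):
--     """Cyclic left shift by one on L-bit integer x (L >= 1)."""
--     return ((x << 1) & ((1 << L) - 1)) | (x >> (L - 1))
--
-- def orbit_states(b, L):
--     """Return unique orbit of basis state b under translations T^r, r=0..L-1.
--     Also returns the minimal period R (stabilizer size divisor) s.t. T^R|b>=|b|.
--     Two-pass: find the minimal period R first, then rebuild the R distinct states."""
--     R = 0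
--     cur = b
--     for r in range(L):
--         cur = _rot(cur, L)
--         if cur == b:
--             R = r + 1
--             break
--     states = []
--     cur = b
--     for _ in range(R):
--         states.append(cur)
--         cur = _rot(cur, L)
--     return states, R
-- ===== Notes on version B (the rewrite author's own statement) =====
-- stated objective: simpler
-- what changed: B drops A's seen-dict/break orbit accumulation and instead makes two plain passes: first find the minimal period R as the smallest r in 1..L with rotate^r(b) == b, then rebuild the R distinct states by rotating R times.
-- outside the precondition, e.g. on orbit_states(-25, 3): A returns ([-25, -1], 2), B returns ([], 0); on orbit_states(14, 3): A returns ([14, 7], 2), B returns ([], 0)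
import Mathlib
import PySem

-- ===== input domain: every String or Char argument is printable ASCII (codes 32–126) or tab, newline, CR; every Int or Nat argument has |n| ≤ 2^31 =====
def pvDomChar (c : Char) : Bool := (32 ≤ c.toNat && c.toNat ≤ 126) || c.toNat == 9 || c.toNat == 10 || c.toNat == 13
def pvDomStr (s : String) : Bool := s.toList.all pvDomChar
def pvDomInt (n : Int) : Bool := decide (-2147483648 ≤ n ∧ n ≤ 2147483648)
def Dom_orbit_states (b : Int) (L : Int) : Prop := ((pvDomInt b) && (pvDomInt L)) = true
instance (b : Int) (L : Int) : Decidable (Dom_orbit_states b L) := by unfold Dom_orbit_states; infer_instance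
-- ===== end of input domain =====

-- B replaces A's seen-dict orbit loop by a two-pass scheme: find the minimal period R first,
-- then rebuild the R distinct states; equivalence is proved on the natural domain 0 ≤ b < 2^L (and L ≤ 0).

-- ===== PORT A =====
-- rotate_bits_left(x, L, s); orbit_states only calls it with L ≥ 1 and s = 1, where
-- s' = s % L and the shift amounts s', L, L - s' are nonnegative, so .toNat is exact there.
def rotate_bits_left (x : Int) (L : Int) (s : Int) : Int :=
  let s' := PySem.Int.mod s L
  if s' = 0 then x
  else
    let upper := PySem.Int.band (x <<< s'.toNat) (((1 : Int) <<< L.toNat) - 1)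
    let lower := x >>> (L - s').toNat
    PySem.Int.bor upper lower

-- the 'for r in range(L)' loop of A: break on 'cur in seen', else record and rotate
def orbitA_loop (L : Int) : List Int → PySem.Dict Int Int → List Int → Int → List Int
  | [], _, states, _ => states
  | r :: rs, seen, states, cur =>
    if seen.contains cur then states
    else orbitA_loop L rs (seen.insert cur r) (states ++ [cur]) (rotate_bits_left cur L 1)

def orbit_states (b : Int) (L : Int) : List Int × Int :=
  let states := orbitA_loop L (PySem.List.pyRange 0 L 1) PySem.Dict.empty [] b
  (states, (states.length : Int))

-- ===== PORT B =====
-- _rot(x, L) of Source B; called only with L ≥ 1, where the shift amounts 1, L, L-1 are nonnegative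
def rot_alt (x : Int) (L : Int) : Int :=
  PySem.Int.bor (PySem.Int.band (x <<< (1 : Nat)) (((1 : Int) <<< L.toNat) - 1)) (x >>> (L - 1).toNat)

-- first loop of Source B: find the minimal period R (0 if the loop runs out)
def altFindR (L : Int) (b : Int) : List Int → Int → Int
  | [], _ => 0
  | r :: rs, cur =>
    let cur' := rot_alt cur L
    if cur' = b then r + 1 else altFindR L b rs cur'

-- second loop of Source B: append cur and rotate, R times
def altBuild (L : Int) : Nat → Int → List Int
  | 0, _ => []
  | n + 1, cur => cur :: altBuild L n (rot_alt cur L)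

def orbit_states_alt (b : Int) (L : Int) : List Int × Int :=
  let R := altFindR L b (PySem.List.pyRange 0 L 1) b
  (altBuild L R.toNat b, R)

-- ===== PRECONDITION & SPEC =====
-- Pre_ restricts to the function's natural domain: basis states 0 ≤ b < 2^L of an L-site chain
-- (plus every L ≤ 0, where both programs return ([], 0)).  Outside it A still returns, but its
-- truncated list is an artefact of the seen-dict break on a rho-shaped (non-cyclic) iteration,
-- which B's period-based reconstruction cannot and should not match.
-- (The disjunct 32 ≤ L keeps the instance computable: under Dom_, b ≤ 2^31 < 2^L there.)
def Pre_orbit_states (b : Int) (L : Int) : Prop :=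
  L ≤ 0 ∨ (0 ≤ b ∧ (32 ≤ L ∨ b < 2 ^ L.toNat))
instance (b : Int) (L : Int) : Decidable (Pre_orbit_states b L) := by
  unfold Pre_orbit_states; infer_instance

def pvWitness_orbit_states : Int × Int := (5, 4)

def Spec_orbit_states (b : Int) (L : Int) (out : List Int × Int) : Prop := out = orbit_states_alt b L
instance (b : Int) (L : Int) (out : List Int × Int) : Decidable (Spec_orbit_states b L out) := by
  unfold Spec_orbit_states; infer_instance

-- ===== CLAIM (what is proved, stated in full; the proofs are below) =====
def Claim_equal_orbit_states : Prop :=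
  ∀ (b : Int) (L : Int), Dom_orbit_states b L → Pre_orbit_states b L →
    Spec_orbit_states b L (orbit_states b L)

-- ===== LEMMAS AND PROOFS =====

-- 2m ||| 1 = 2m + 1 on Nat (disjoint bits)
theorem pv_two_mul_or_one (m : Nat) : 2 * m ||| 1 = 2 * m + 1 := by
  have h := Nat.lor_bit false m true 0
  simpa [Nat.bit_false_apply, Nat.bit_true_apply] using h

-- arithmetic form of the rotation on the natural domain
theorem rot_alt_arith (L : Int) (n : Nat) (hL : L = (n : Int)) (hn : 1 ≤ n)
    (x : Int) (hx0 : 0 ≤ x) (hxN : x < 2 ^ n) :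
    rot_alt x L = 2 * (x % 2 ^ (n - 1)) + x / 2 ^ (n - 1) := by
  have hLt : L.toNat = n := by omega
  have hL1t : (L - 1).toNat = n - 1 := by omega
  have hpow : (2 : Int) ^ n = 2 * 2 ^ (n - 1) := by
    rw [← pow_succ']; congr 1; omega
  have hHpos : (0 : Int) < 2 ^ (n - 1) := by positivity
  set H : Int := 2 ^ (n - 1) with hH
  have hq0 : 0 ≤ x / H := Int.ediv_nonneg hx0 (le_of_lt hHpos)
  have hq1 : x / H ≤ 1 := by
    have : x < 2 * H := by omega
    have h2 : x / H < 2 := Int.ediv_lt_of_lt_mul hHpos (by linarith)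
    omega
  have hm0 : 0 ≤ x % H := Int.emod_nonneg x (ne_of_gt hHpos)
  have hmH : x % H < H := Int.emod_lt_of_pos x hHpos
  have hxdm : H * (x / H) + x % H = x := Int.mul_ediv_add_emod x H
  -- the masked left shift is 2 * (x % H)
  have hshl : x <<< (1 : Nat) = x * 2 := by rw [Int.shiftLeft_eq]; norm_num
  have hone : (1 : Int) <<< L.toNat = 2 ^ n := by rw [Int.shiftLeft_eq, hLt]; ring
  have hband : PySem.Int.band (x <<< (1 : Nat)) (((1 : Int) <<< L.toNat) - 1) = 2 * (x % H) := by
    rw [hshl, hone]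
    have h2x0 : (0 : Int) ≤ x * 2 := by omega
    have hmask0 : (0 : Int) ≤ 2 ^ n - 1 := by omega
    rw [PySem.Int.band_of_nonneg h2x0 hmask0]
    have ht : ((2 : Int) ^ n - 1).toNat = 2 ^ n - 1 := by
      have : ((2 : Int) ^ n) = ((2 ^ n : Nat) : Int) := by push_cast; ring
      omega
    rw [ht, Nat.and_two_pow_sub_one_eq_mod]
    have hx2 : (x * 2).toNat = x.toNat * 2 := by omega
    rw [hx2]
    have hxval : (x.toNat : Int) = x := Int.toNat_of_nonneg hx0
    have hcast : ((x.toNat * 2 % 2 ^ n : Nat) : Int) = (x * 2) % 2 ^ n := by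
      push_cast [hxval]
      ring_nf
    rw [hcast]
    -- x * 2 = 2 ^ n * (x / H) + 2 * (x % H)
    have hsplit : x * 2 = 2 * (x % H) + 2 ^ n * (x / H) := by
      rw [hpow]; linarith [hxdm]
    rw [hsplit, Int.add_mul_emod_self_left]
    exact Int.emod_eq_of_lt (by omega) (by omega)
  have hshr : x >>> (L - 1).toNat = x / H := by
    rw [Int.shiftRight_eq_div_pow, hL1t, hH]
    norm_num
  show PySem.Int.bor (PySem.Int.band (x <<< (1 : Nat)) (((1 : Int) <<< L.toNat) - 1)) (x >>> (L - 1).toNat)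
      = 2 * (x % H) + x / H
  rw [hband, hshr]
  have hq01 : x / H = 0 ∨ x / H = 1 := by omega
  rcases hq01 with hq | hq
  · rw [hq, PySem.Int.bor_zero]; ring
  · rw [hq]
    have h1 : PySem.Int.bor (2 * (x % H)) 1 = ((2 * (x % H)).toNat ||| (1 : Int).toNat : Nat) := by
      exact PySem.Int.bor_of_nonneg (by omega) (by omega)
    rw [h1]
    have h2 : (2 * (x % H)).toNat = 2 * (x % H).toNat := by omega
    have h3 : ((1 : Int)).toNat = 1 := rfl
    rw [h2, h3, pv_two_mul_or_one]
    omega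

-- A's rotation with s = 1 is B's rotation
theorem rotate_eq_rot_alt (L : Int) (n : Nat) (hL : L = (n : Int)) (hn : 1 ≤ n) (x : Int) :
    rotate_bits_left x L 1 = rot_alt x L := by
  have hLpos : (0 : Int) < L := by omega
  by_cases h1 : n = 1
  · -- L = 1 : s % L = 0, and the rotation is the identity on both sides
    have hL1 : L = 1 := by omega
    subst hL1
    have hmod : PySem.Int.mod 1 1 = 0 := by decide
    have hA : rotate_bits_left x 1 1 = x := by
      simp only [rotate_bits_left, hmod, if_pos]
    rw [hA]
    have hb1 : ((1 : Int) <<< (1 : Int).toNat) - 1 = 1 := by decide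
    have hsh : x >>> ((1 : Int) - 1).toNat = x := by
      rw [Int.shiftRight_eq_div_pow]; norm_num
    show x = PySem.Int.bor (PySem.Int.band (x <<< (1 : Nat)) (((1 : Int) <<< (1 : Int).toNat) - 1)) (x >>> ((1 : Int) - 1).toNat)
    rw [hb1, hsh, PySem.Int.band_one]
    have hmod2 : PySem.Int.mod (x <<< (1 : Nat)) 2 = 0 := by
      rw [PySem.Int.mod_eq_emod_of_pos (by norm_num), Int.shiftLeft_eq]
      norm_num [Int.mul_emod_left]
    rw [hmod2, PySem.Int.bor_comm, PySem.Int.bor_zero]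
  · -- L ≥ 2 : s % L = 1 and the two expressions coincide syntactically
    have hL2 : (2 : Int) ≤ L := by omega
    have hmod : PySem.Int.mod 1 L = 1 := by
      rw [PySem.Int.mod_eq_emod_of_pos hLpos]
      exact Int.emod_eq_of_lt (by norm_num) (by omega)
    show (if PySem.Int.mod 1 L = 0 then x else
        PySem.Int.bor (PySem.Int.band (x <<< (PySem.Int.mod 1 L).toNat) (((1 : Int) <<< L.toNat) - 1))
          (x >>> (L - PySem.Int.mod 1 L).toNat)) = rot_alt x L
    rw [hmod]
    norm_num [rot_alt]

-- the rotation stays in [0, 2^n)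
theorem rot_alt_range (L : Int) (n : Nat) (hL : L = (n : Int)) (hn : 1 ≤ n)
    (x : Int) (hx0 : 0 ≤ x) (hxN : x < 2 ^ n) :
    0 ≤ rot_alt x L ∧ rot_alt x L < 2 ^ n := by
  rw [rot_alt_arith L n hL hn x hx0 hxN]
  have hpow : (2 : Int) ^ n = 2 * 2 ^ (n - 1) := by
    rw [← pow_succ']; congr 1; omega
  have hHpos : (0 : Int) < 2 ^ (n - 1) := by positivity
  have hm0 : 0 ≤ x % 2 ^ (n - 1) := Int.emod_nonneg x (ne_of_gt hHpos)
  have hmH : x % 2 ^ (n - 1) < 2 ^ (n - 1) := Int.emod_lt_of_pos x hHpos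
  have hq0 : 0 ≤ x / 2 ^ (n - 1) := Int.ediv_nonneg hx0 (le_of_lt hHpos)
  have hq1 : x / 2 ^ (n - 1) ≤ 1 := by
    have h2 : x / 2 ^ (n - 1) < 2 := Int.ediv_lt_of_lt_mul hHpos (by linarith [hxN, hpow])
    omega
  omega

-- the rotation is injective on [0, 2^n)
theorem rot_alt_inj (L : Int) (n : Nat) (hL : L = (n : Int)) (hn : 1 ≤ n)
    (x y : Int) (hx0 : 0 ≤ x) (hxN : x < 2 ^ n) (hy0 : 0 ≤ y) (hyN : y < 2 ^ n)
    (h : rot_alt x L = rot_alt y L) : x = y := by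
  rw [rot_alt_arith L n hL hn x hx0 hxN, rot_alt_arith L n hL hn y hy0 hyN] at h
  have hpow : (2 : Int) ^ n = 2 * 2 ^ (n - 1) := by
    rw [← pow_succ']; congr 1; omega
  have hHpos : (0 : Int) < 2 ^ (n - 1) := by positivity
  have hx := Int.mul_ediv_add_emod x (2 ^ (n - 1))
  have hy := Int.mul_ediv_add_emod y (2 ^ (n - 1))
  have hmx : x % 2 ^ (n - 1) < 2 ^ (n - 1) := Int.emod_lt_of_pos x hHpos
  have hmy : y % 2 ^ (n - 1) < 2 ^ (n - 1) := Int.emod_lt_of_pos y hHpos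
  have hmx0 : 0 ≤ x % 2 ^ (n - 1) := Int.emod_nonneg x (ne_of_gt hHpos)
  have hmy0 : 0 ≤ y % 2 ^ (n - 1) := Int.emod_nonneg y (ne_of_gt hHpos)
  have hqx : 0 ≤ x / 2 ^ (n - 1) := Int.ediv_nonneg hx0 (le_of_lt hHpos)
  have hqy : 0 ≤ y / 2 ^ (n - 1) := Int.ediv_nonneg hy0 (le_of_lt hHpos)
  have hqx1 : x / 2 ^ (n - 1) < 2 := Int.ediv_lt_of_lt_mul hHpos (by linarith)
  have hqy1 : y / 2 ^ (n - 1) < 2 := Int.ediv_lt_of_lt_mul hHpos (by linarith)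
  -- equal images force equal (quotient, remainder) pairs, hence equal inputs
  have hq : x / 2 ^ (n - 1) = y / 2 ^ (n - 1) := by omega
  have hm : x % 2 ^ (n - 1) = y % 2 ^ (n - 1) := by omega
  rw [hq, hm] at hx
  omega

theorem iter_range (L : Int) (n : Nat) (hL : L = (n : Int)) (hn : 1 ≤ n)
    (x : Int) (hx0 : 0 ≤ x) (hxN : x < 2 ^ n) (k : Nat) :
    0 ≤ (fun y => rot_alt y L)^[k] x ∧ (fun y => rot_alt y L)^[k] x < 2 ^ n := by
  induction k with
  | zero => exact ⟨hx0, hxN⟩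
  | succ k ih =>
      rw [Function.iterate_succ_apply']
      exact rot_alt_range L n hL hn _ ih.1 ih.2

theorem iter_cancel (L : Int) (n : Nat) (hL : L = (n : Int)) (hn : 1 ≤ n) (k : Nat) :
    ∀ x y : Int, 0 ≤ x → x < 2 ^ n → 0 ≤ y → y < 2 ^ n →
    (fun z => rot_alt z L)^[k] x = (fun z => rot_alt z L)^[k] y → x = y := by
  induction k with
  | zero => intro x y _ _ _ _ h; exact h
  | succ k ih =>
      intro x y hx0 hxN hy0 hyN h
      rw [Function.iterate_succ_apply, Function.iterate_succ_apply] at h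
      have hx := rot_alt_range L n hL hn x hx0 hxN
      have hy := rot_alt_range L n hL hn y hy0 hyN
      exact rot_alt_inj L n hL hn x y hx0 hxN hy0 hyN (ih _ _ hx.1 hx.2 hy.1 hy.2 h)

-- explicit form of the k-fold rotation: it swaps the two bit blocks
theorem iter_formula (L : Int) (n : Nat) (hL : L = (n : Int)) (hn : 1 ≤ n) :
    ∀ k : Nat, k ≤ n → ∀ q r : Int, 0 ≤ q → q < 2 ^ k → 0 ≤ r → r < 2 ^ (n - k) →
    (fun z => rot_alt z L)^[k] (2 ^ (n - k) * q + r) = 2 ^ k * r + q := by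
  intro k
  induction k with
  | zero =>
      intro _ q r hq0 hq1 hr0 hrM
      have hq : q = 0 := by omega
      subst hq
      norm_num
  | succ k ih =>
      intro hk1 q r hq0 hq1 hr0 hrM
      have hkn : k ≤ n := by omega
      have hBpos : (0 : Int) < 2 ^ (n - (k + 1)) := by positivity
      have h2B : (2 : Int) ^ (n - k) = 2 * 2 ^ (n - (k + 1)) := by
        rw [← pow_succ']; congr 1; omega
      have hP1 : (2 : Int) ^ (k + 1) = 2 * 2 ^ k := by rw [pow_succ']
      have hP3 : (2 : Int) ^ k * 2 ^ (n - (k + 1)) = 2 ^ (n - 1) := by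
        rw [← pow_add]; congr 1; omega
      have hNH : (2 : Int) ^ n = 2 * 2 ^ (n - 1) := by rw [← pow_succ']; congr 1; omega
      have h2kpos : (0 : Int) < 2 ^ k := by positivity
      have hHpos : (0 : Int) < 2 ^ (n - 1) := by positivity
      obtain ⟨q', q₀, hqeq, hq'0, hq'lt, hq₀⟩ :
          ∃ q' q₀ : Int, q = 2 * q' + q₀ ∧ 0 ≤ q' ∧ q' < 2 ^ k ∧ (q₀ = 0 ∨ q₀ = 1) := by
        refine ⟨q / 2, q % 2, by omega, by omega, by omega, by omega⟩
      -- the product 2^k * r is bounded by 2^(n-1) - 2^k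
      have hkr0 : (0 : Int) ≤ 2 ^ k * r := mul_nonneg h2kpos.le hr0
      have hkrle : 2 ^ k * r ≤ 2 ^ k * (2 ^ (n - (k + 1)) - 1) :=
        mul_le_mul_of_nonneg_left (by omega) h2kpos.le
      have hkrlt : 2 ^ k * r + q' < 2 ^ (n - 1) := by nlinarith
      have hy0 : (0 : Int) ≤ 2 ^ k * r + q' := by linarith
      rcases hq₀ with h0 | h1
      · -- even block count: the extra top bit is 0
        have hx : 2 ^ (n - (k + 1)) * q + r = 2 ^ (n - k) * q' + r := by
          rw [h2B, hqeq, h0]; ring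
        rw [hx, Function.iterate_succ_apply',
            ih hkn q' r hq'0 hq'lt hr0 (by omega)]
        rw [rot_alt_arith L n hL hn _ hy0 (by linarith)]
        rw [Int.emod_eq_of_lt hy0 hkrlt, Int.ediv_eq_zero_of_lt hy0 hkrlt]
        rw [hP1, hqeq, h0]; ring
      · -- odd block count: the extra top bit is 1
        have hx : 2 ^ (n - (k + 1)) * q + r = 2 ^ (n - k) * q' + (2 ^ (n - (k + 1)) + r) := by
          rw [h2B, hqeq, h1]; ring
        rw [hx, Function.iterate_succ_apply',
            ih hkn q' (2 ^ (n - (k + 1)) + r) hq'0 hq'lt (by omega) (by omega)]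
        have hyeq : 2 ^ k * (2 ^ (n - (k + 1)) + r) + q' = (2 ^ k * r + q') + 2 ^ (n - 1) * 1 := by
          rw [← hP3]; ring
        rw [hyeq, rot_alt_arith L n hL hn _ (by linarith) (by linarith)]
        rw [Int.add_mul_emod_self_left, Int.add_mul_ediv_left _ _ (ne_of_gt hHpos)]
        rw [Int.emod_eq_of_lt hy0 hkrlt, Int.ediv_eq_zero_of_lt hy0 hkrlt]
        rw [hP1, hqeq, h1]; ring

-- rotating L times is the identity on the natural domain
theorem iter_n (L : Int) (n : Nat) (hL : L = (n : Int)) (hn : 1 ≤ n)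
    (b : Int) (hb0 : 0 ≤ b) (hbN : b < 2 ^ n) :
    (fun z => rot_alt z L)^[n] b = b := by
  have h := iter_formula L n hL hn n le_rfl b 0 hb0 hbN le_rfl (by norm_num)
  simpa using h

theorem altBuild_snoc (L : Int) (a : Nat) :
    ∀ x : Int, altBuild L (a + 1) x = altBuild L a x ++ [(fun z => rot_alt z L)^[a] x] := by
  induction a with
  | zero => intro x; rfl
  | succ a ih =>
      intro x
      show x :: altBuild L (a + 1) (rot_alt x L) = _
      rw [ih (rot_alt x L)]
      simp [altBuild, Function.iterate_succ_apply]

theorem altBuild_length (L : Int) (a : Nat) : ∀ x : Int, (altBuild L a x).length = a := by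
  induction a with
  | zero => intro x; rfl
  | succ a ih => intro x; simp [altBuild, ih]

-- B's first loop returns the minimal period
theorem altFindR_eq (L : Int) (n : Nat) (hL : L = (n : Int)) (_hn : 1 ≤ n)
    (b : Int) (R₀ : Nat) (_hR0 : 0 < R₀) (hRn : R₀ ≤ n)
    (hRb : (fun z => rot_alt z L)^[R₀] b = b)
    (hmin : ∀ j : Nat, 0 < j → j < R₀ → (fun z => rot_alt z L)^[j] b ≠ b) :
    ∀ k a : Nat, a + (k + 1) = R₀ →
      altFindR L b (PySem.List.pyRange (a : Int) L 1) ((fun z => rot_alt z L)^[a] b) = (R₀ : Int) := by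
  intro k
  induction k with
  | zero =>
      intro a ha
      have haL : (a : Int) < L := by rw [hL]; exact_mod_cast (by omega : a < n)
      rw [PySem.List.pyRange_one_cons haL]
      simp only [altFindR]
      have hcur : rot_alt ((fun z => rot_alt z L)^[a] b) L = (fun z => rot_alt z L)^[a + 1] b := by
        rw [Function.iterate_succ_apply']
      have ha1 : a + 1 = R₀ := by omega
      rw [hcur, ha1, hRb, if_pos rfl]
      omega
  | succ k ihk =>
      intro a ha
      have haL : (a : Int) < L := by rw [hL]; exact_mod_cast (by omega : a < n)
      rw [PySem.List.pyRange_one_cons haL]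
      simp only [altFindR]
      have hcur : rot_alt ((fun z => rot_alt z L)^[a] b) L = (fun z => rot_alt z L)^[a + 1] b := by
        rw [Function.iterate_succ_apply']
      have hne : (fun z => rot_alt z L)^[a + 1] b ≠ b := hmin (a + 1) (by omega) (by omega)
      rw [hcur, if_neg hne]
      have hcast : (a : Int) + 1 = ((a + 1 : Nat) : Int) := by omega
      rw [hcast]
      exact ihk (a + 1) (by omega)

-- A's loop computes the first R₀ iterates
theorem orbitA_loop_eq (L : Int) (n : Nat) (hL : L = (n : Int)) (hn : 1 ≤ n)
    (b : Int) (hb0 : 0 ≤ b) (hbN : b < 2 ^ n) (R₀ : Nat) (hR0 : 0 < R₀) (hRn : R₀ ≤ n)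
    (hRb : (fun z => rot_alt z L)^[R₀] b = b)
    (hmin : ∀ j : Nat, 0 < j → j < R₀ → (fun z => rot_alt z L)^[j] b ≠ b) :
    ∀ k a : Nat, a + k = R₀ → ∀ seen : PySem.Dict Int Int,
      (∀ x : Int, seen.contains x = true ↔ ∃ j : Nat, j < a ∧ (fun z => rot_alt z L)^[j] b = x) →
      orbitA_loop L (PySem.List.pyRange (a : Int) L 1) seen (altBuild L a b)
        ((fun z => rot_alt z L)^[a] b) = altBuild L R₀ b := by
  intro k
  induction k with
  | zero =>
      intro a ha seen hseen
      have haR : a = R₀ := by omega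
      subst haR
      by_cases hcase : a = n
      · -- range exhausted: the loop returns the accumulated states
        have hempty : PySem.List.pyRange (a : Int) L 1 = [] := by
          have : L ≤ (a : Int) := by rw [hL, hcase]
          simp [PySem.List.pyRange]; omega
        rw [hempty]
        rfl
      · -- the current state b is already in seen: break
        have haL : (a : Int) < L := by
          rw [hL]; exact_mod_cast (by omega : a < n)
        rw [PySem.List.pyRange_one_cons haL]
        simp only [orbitA_loop]
        have hc : seen.contains ((fun z => rot_alt z L)^[a] b) = true := by
          rw [hseen]
          exact ⟨0, hR0, by simpa using hRb.symm⟩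
        rw [hc]
        rfl
  | succ k ihk =>
      intro a ha seen hseen
      have haR : a < R₀ := by omega
      have haL : (a : Int) < L := by rw [hL]; exact_mod_cast (by omega : a < n)
      rw [PySem.List.pyRange_one_cons haL]
      simp only [orbitA_loop]
      have hc : seen.contains ((fun z => rot_alt z L)^[a] b) = false := by
        rw [Bool.eq_false_iff]
        intro hct
        obtain ⟨j, hj, hje⟩ := (hseen _).1 hct
        have hsplit : (fun z => rot_alt z L)^[a] b
            = (fun z => rot_alt z L)^[j] ((fun z => rot_alt z L)^[a - j] b) := by
          rw [← Function.iterate_add_apply]; congr 1; omega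
        have hr := iter_range L n hL hn b hb0 hbN (a - j)
        have hfix : (fun z => rot_alt z L)^[a - j] b = b := by
          apply iter_cancel L n hL hn j _ b hr.1 hr.2 hb0 hbN
          rw [← hsplit, hje]
        exact hmin (a - j) (by omega) (by omega) hfix
      rw [hc]
      simp only [Bool.false_eq_true, if_false]
      have hrot : rotate_bits_left ((fun z => rot_alt z L)^[a] b) L 1
          = (fun z => rot_alt z L)^[a + 1] b := by
        rw [rotate_eq_rot_alt L n hL hn, Function.iterate_succ_apply']
      have hst : altBuild L a b ++ [(fun z => rot_alt z L)^[a] b] = altBuild L (a + 1) b :=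
        (altBuild_snoc L a b).symm
      have hcast : (a : Int) + 1 = ((a + 1 : Nat) : Int) := by omega
      rw [hrot, hst, hcast]
      apply ihk (a + 1) (by omega)
      intro x
      rw [PySem.Dict.contains_insert]
      constructor
      · intro hx
        rcases Bool.or_eq_true_iff.1 hx with hx | hx
        · exact ⟨a, by omega, by simpa using (beq_iff_eq.1 hx).symm⟩
        · obtain ⟨j, hj, hje⟩ := (hseen x).1 hx
          exact ⟨j, by omega, hje⟩
      · rintro ⟨j, hj, hje⟩
        rcases Nat.lt_succ_iff_lt_or_eq.1 hj with hj' | hj'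
        · exact Bool.or_eq_true_iff.2 (Or.inr ((hseen x).2 ⟨j, hj', hje⟩))
        · subst hj'
          exact Bool.or_eq_true_iff.2 (Or.inl (beq_iff_eq.2 hje.symm))

-- ===== VERDICT (by name: the statement is the Claim_ definition above) =====
theorem orbit_states_spec : Claim_equal_orbit_states := by
  intro b L hdom hpre
  unfold Spec_orbit_states
  by_cases hL0 : L ≤ 0
  · -- L ≤ 0 : range(L) is empty, both sides return ([], 0)
    have hrange : PySem.List.pyRange 0 L 1 = [] := by
      simp [PySem.List.pyRange]; omega
    simp [orbit_states, orbit_states_alt, hrange, orbitA_loop, altFindR, altBuild]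
  · have hL : L = (L.toNat : Int) := by omega
    set n := L.toNat with hn'
    have hn : 1 ≤ n := by omega
    have hb0 : 0 ≤ b := by
      rcases hpre with h | h
      · omega
      · exact h.1
    have hbN : b < 2 ^ n := by
      rcases hpre with h | ⟨_, h32 | hlt⟩
      · omega
      · have h1 : b ≤ 2147483648 := by
          unfold Dom_orbit_states pvDomInt at hdom
          simp only [Bool.and_eq_true, decide_eq_true_eq] at hdom
          exact hdom.1.2
        have h2 : (2 : Int) ^ 32 ≤ 2 ^ n := by
          apply pow_le_pow_right₀ (by norm_num)
          omega
        have h3 : (2147483648 : Int) < 2 ^ 32 := by norm_num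
        omega
      · exact hlt
    have hfn : (fun z => rot_alt z L)^[n] b = b := iter_n L n hL hn b hb0 hbN
    have hex : ∃ r : Nat, 0 < r ∧ r ≤ n ∧ (fun z => rot_alt z L)^[r] b = b := ⟨n, hn, le_rfl, hfn⟩
    have hspec := Nat.find_spec hex
    have hmin : ∀ j : Nat, 0 < j → j < Nat.find hex → (fun z => rot_alt z L)^[j] b ≠ b := by
      intro j hj0 hjR hj
      exact Nat.find_min hex hjR ⟨hj0, by omega, hj⟩
    have hA := orbitA_loop_eq L n hL hn b hb0 hbN (Nat.find hex) hspec.1 hspec.2.1 hspec.2.2 hmin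
      (Nat.find hex) 0 (by omega) PySem.Dict.empty
      (by intro x; simp [PySem.Dict.contains_empty])
    have hB := altFindR_eq L n hL hn b (Nat.find hex) hspec.1 hspec.2.1 hspec.2.2 hmin
      (Nat.find hex - 1) 0 (by omega)
    simp only [Nat.cast_zero, Function.iterate_zero_apply] at hA hB
    rw [show altBuild L 0 b = ([] : List Int) from rfl] at hA
    show (orbitA_loop L (PySem.List.pyRange 0 L 1) PySem.Dict.empty [] b,
        ((orbitA_loop L (PySem.List.pyRange 0 L 1) PySem.Dict.empty [] b).length : Int))
      = (altBuild L (altFindR L b (PySem.List.pyRange 0 L 1) b).toNat b,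
        altFindR L b (PySem.List.pyRange 0 L 1) b)
    rw [hA, hB, Int.toNat_natCast, altBuild_length]
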